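-- pv_equiv track=rewrite | github.com/arlungua/F.CS301 | Lab 8/8-3.py | find_closest_bikes
-- ===== SOURCE A (Python) =====
-- def find_closest_bikes(students, bikes):
--     n = len(students)
--     m = len(bikes)
--
--     result = [-1] * n
--     bike_taken = [False] * m
--
--     for student_index in range(n):
--         min_distance = float('inf')
--         chosen_bike = -1  # Сонгогдсон дугуй
--
--         for bike_index in range(m):
--             if not bike_taken[bike_index]:
--                 distance = abs(students[student_index][0] - bikes[bike_index][0]) + abs(students[student_index][1] - bikes[bike_index][1])
--
--                 if distance < min_distance:
--                     min_distance = distance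
--                     chosen_bike = bike_index
--                 elif distance == min_distance:
--                     if bike_index < chosen_bike:
--                         chosen_bike = bike_index
--
--         result[student_index] = chosen_bike
--         bike_taken[chosen_bike] = True
--
--     return result
-- ===== SOURCE B (Python) =====
-- def find_closest_bikes(students, bikes):
--     m = len(bikes)
--     taken = [False] * m
--     result = []
--     for sx, sy in students:
--         # bikes in order of increasing distance; stable sort keeps index order on ties
--         order = sorted(range(m), key=lambda j: abs(sx - bikes[j][0]) + abs(sy - bikes[j][1]))
--         chosen = -1
--         for j in order:
--             if not taken[j]:
--                 chosen = j
--                 taken[j] = True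
--                 break
--         result.append(chosen)
--     return result
-- ===== Notes on version B (the rewrite author's own statement) =====
-- stated objective: alternative
-- what changed: Replaces A's per-student linear argmin scan with boolean-skip and tie-break branches by a per-student stable sort of bike indices by distance followed by picking the first not-yet-taken index; the -1 write into the taken array disappears because B only marks a bike when one was found.
import Mathlib
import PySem

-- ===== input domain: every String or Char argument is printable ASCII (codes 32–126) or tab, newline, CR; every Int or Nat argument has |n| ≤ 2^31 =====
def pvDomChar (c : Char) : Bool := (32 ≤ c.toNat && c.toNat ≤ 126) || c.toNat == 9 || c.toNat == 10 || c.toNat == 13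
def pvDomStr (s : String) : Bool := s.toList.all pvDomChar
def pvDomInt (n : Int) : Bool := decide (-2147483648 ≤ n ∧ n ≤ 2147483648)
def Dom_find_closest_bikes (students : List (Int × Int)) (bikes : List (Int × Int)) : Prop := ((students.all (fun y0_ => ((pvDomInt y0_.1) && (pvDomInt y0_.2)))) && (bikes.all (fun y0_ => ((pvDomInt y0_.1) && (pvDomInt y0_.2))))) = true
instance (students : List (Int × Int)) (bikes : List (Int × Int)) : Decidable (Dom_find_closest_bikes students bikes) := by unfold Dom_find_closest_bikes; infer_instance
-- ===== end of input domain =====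

-- B assigns each student the first untaken bike on a distance-sorted index list instead of A's
-- linear argmin scan: a genuinely different per-student strategy of similar cost (objective: alternative).


-- ===== PORT A =====
-- inner loop body: 'for bike_index in range(m): if not bike_taken[...]: ... min/chosen update'
def pvInnerStep (students bikes : List (Int × Int)) (si : Int) (bike_taken : List Bool)
    (mc : Option Int × Int) (bi : Int) : Option Int × Int :=
  if PySem.List.pyGetD bike_taken bi true = false then
    let s := PySem.List.pyGetD students si ((0 : Int), (0 : Int))
    let b := PySem.List.pyGetD bikes bi ((0 : Int), (0 : Int))
    let distance := |s.1 - b.1| + |s.2 - b.2|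
    match mc.1 with
    | none => (some distance, bi)            -- distance < float('inf')
    | some md =>
      if distance < md then (some distance, bi)
      else if distance = md then (mc.1, if bi < mc.2 then bi else mc.2)
      else mc
  else mc

-- outer loop body: choose a bike for student si, write result[si] and bike_taken[chosen]
def pvStepA (students bikes : List (Int × Int)) (acc : List Int × List Bool) (si : Int) :
    List Int × List Bool :=
  let inner := (PySem.List.pyRange 0 (bikes.length : Int) 1).foldl
                 (pvInnerStep students bikes si acc.2) (none, -1)
  let chosen := inner.2
  (PySem.List.pySetD acc.1 si chosen, PySem.List.pySetD acc.2 chosen true)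

def find_closest_bikes (students : List (Int × Int)) (bikes : List (Int × Int)) : List Int :=
  let n : Int := students.length
  let m : Int := bikes.length
  ((PySem.List.pyRange 0 n 1).foldl (pvStepA students bikes)
    (List.replicate n.toNat (-1), List.replicate m.toNat false)).1

-- ===== PORT B =====
-- sort key: manhattan distance from (sx, sy) to bikes[j]
def pvKeyB (bikes : List (Int × Int)) (sx sy : Int) (j : Int) : Int :=
  |sx - (PySem.List.pyGetD bikes j ((0 : Int), (0 : Int))).1| +
  |sy - (PySem.List.pyGetD bikes j ((0 : Int), (0 : Int))).2|

-- 'for j in order: if not taken[j]: ... break'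
def pvPick : List Int → List Bool → Option Int
  | [], _ => none
  | j :: js, taken => if PySem.List.pyGetD taken j true = false then some j else pvPick js taken

-- 'for sx, sy in students: ...'
def pvGoB (bikes : List (Int × Int)) : List (Int × Int) → List Bool → List Int
  | [], _ => []
  | (sx, sy) :: rest, taken =>
    let order := PySem.List.sorted (PySem.List.pyRange 0 (bikes.length : Int) 1) (pvKeyB bikes sx sy)
    match pvPick order taken with
    | none => (-1) :: pvGoB bikes rest taken
    | some j => j :: pvGoB bikes rest (PySem.List.pySetD taken j true)

def find_closest_bikes_alt (students : List (Int × Int)) (bikes : List (Int × Int)) : List Int :=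
  pvGoB bikes students (List.replicate bikes.length false)

-- ===== PRECONDITION & SPEC =====
-- Pre_ excludes exactly the inputs where A raises IndexError: non-empty students with no bikes
-- (bike_taken[-1] = True on an empty list).
def Pre_find_closest_bikes (students : List (Int × Int)) (bikes : List (Int × Int)) : Prop :=
  students = [] ∨ bikes ≠ []
instance (students : List (Int × Int)) (bikes : List (Int × Int)) : Decidable (Pre_find_closest_bikes students bikes) := by unfold Pre_find_closest_bikes; infer_instance
def pvWitness_find_closest_bikes : (List (Int × Int)) × (List (Int × Int)) :=
  ([(0, 0), (2, 1)], [(1, 1), (3, 3)])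

def Spec_find_closest_bikes (students : List (Int × Int)) (bikes : List (Int × Int)) (out : List Int) : Prop := out = find_closest_bikes_alt students bikes
instance (students : List (Int × Int)) (bikes : List (Int × Int)) (out : List Int) : Decidable (Spec_find_closest_bikes students bikes out) := by unfold Spec_find_closest_bikes; infer_instance

-- ===== CLAIM (what is proved, stated in full; the proofs are below) =====
def Claim_equal_find_closest_bikes : Prop := ∀ (students : List (Int × Int)) (bikes : List (Int × Int)), Dom_find_closest_bikes students bikes → Pre_find_closest_bikes students bikes → Spec_find_closest_bikes students bikes (find_closest_bikes students bikes)


-- ===== LEMMAS AND PROOFS =====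

-- 'free' test and the lexicographic (distance, index) preference order
def pvFree (tk : List Bool) (j : Int) : Prop := PySem.List.pyGetD tk j true = false
def pvLex (d : Int → Int) (a b : Int) : Prop := d a < d b ∨ (d a = d b ∧ a < b)

-- invariant of A's inner fold over range 0..m'
def pvInvA (tk : List Bool) (d : Int → Int) (m' : Nat) (r : Option Int × Int) : Prop :=
  (r = (none, -1) ∧ ∀ j : Int, 0 ≤ j → j < (m' : Int) → ¬ pvFree tk j) ∨
  (∃ c, r = (some (d c), c) ∧ pvFree tk c ∧ 0 ≤ c ∧ c < (m' : Int) ∧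
    ∀ i : Int, 0 ≤ i → i < (m' : Int) → pvFree tk i → d c < d i ∨ (d c = d i ∧ c ≤ i))

theorem pvPick_none (l : List Int) (tk : List Bool) (h : pvPick l tk = none) :
    ∀ j ∈ l, ¬ pvFree tk j := by
  induction l with
  | nil => simp
  | cons a t ih =>
    simp only [pvPick] at h
    split at h
    · simp at h
    · rename_i hna
      intro j hj
      rcases List.mem_cons.1 hj with rfl | hj
      · simpa [pvFree] using hna
      · exact ih h j hj

theorem pvPick_some (d : Int → Int) (l : List Int) (tk : List Bool) (c : Int)
    (hp : l.Pairwise (pvLex d)) (h : pvPick l tk = some c) :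
    pvFree tk c ∧ c ∈ l ∧ ∀ i ∈ l, pvFree tk i → d c < d i ∨ (d c = d i ∧ c ≤ i) := by
  induction l with
  | nil => simp [pvPick] at h
  | cons a t ih =>
    rcases List.pairwise_cons.1 hp with ⟨ha, hpt⟩
    simp only [pvPick] at h
    split at h
    · rename_i hfa
      obtain rfl : a = c := by simpa using h
      refine ⟨hfa, List.mem_cons_self, ?_⟩
      intro i hi _
      rcases List.mem_cons.1 hi with rfl | hi
      · right; exact ⟨rfl, le_refl _⟩
      · rcases ha i hi with h1 | ⟨h1, h2⟩
        · left; exact h1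
        · right; exact ⟨h1, le_of_lt h2⟩
    · rename_i hna
      obtain ⟨h1, h2, h3⟩ := ih hpt h
      refine ⟨h1, List.mem_cons_of_mem _ h2, ?_⟩
      intro i hi hfi
      rcases List.mem_cons.1 hi with rfl | hi
      · exact absurd hfi (by simpa [pvFree] using hna)
      · exact h3 i hi hfi

theorem pvSetD_neg_one_all_true (tk : List Bool) (h : tk ≠ []) (ha : ∀ b ∈ tk, b = true) :
    PySem.List.pySetD tk (-1) true = tk := by
  have hl : 0 < tk.length := List.length_pos_iff.2 h
  have : PySem.List.pySetD tk (-1) true = tk.set (tk.length - 1) true := by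
    have h2 : -(tk.length : Int) ≤ -1 := by omega
    simp [PySem.List.pySetD, PySem.List.pySet?, PySem.List.pyIdx?, h2]
  rw [this]
  apply List.ext_getElem (by simp)
  intro i h1 h2
  rw [List.getElem_set]
  split
  · exact (ha _ (List.getElem_mem h2)).symm
  · rfl

theorem pvInsertBy_lex (d : Int → Int) (x : Int) (ys : List Int)
    (h1 : ys.Pairwise (pvLex d)) (h2 : ∀ y ∈ ys, y < x) :
    (PySem.List.insertBy (fun a b => decide (d a < d b)) x ys).Pairwise (pvLex d) := by
  induction ys with
  | nil => simp [PySem.List.insertBy]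
  | cons y t ih =>
    rcases List.pairwise_cons.1 h1 with ⟨hy, ht⟩
    simp only [PySem.List.insertBy]
    split
    · rename_i hlt
      replace hlt : d x < d y := by simpa using hlt
      refine List.pairwise_cons.2 ⟨?_, h1⟩
      intro z hz
      rcases List.mem_cons.1 hz with rfl | hz
      · left; exact hlt
      · rcases hy z hz with h | ⟨h, _⟩
        · left; exact lt_trans hlt h
        · left; exact h ▸ hlt
    · rename_i hnlt
      replace hnlt : ¬ d x < d y := by simpa using hnlt
      refine List.pairwise_cons.2 ⟨?_, ih ht (fun z hz => h2 z (List.mem_cons_of_mem _ hz))⟩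
      intro z hz
      rcases (PySem.List.mem_insertBy _ _ _ _).1 hz with rfl | hz
      · rcases lt_or_eq_of_le (le_of_not_gt hnlt) with h | h
        · left; exact h
        · right; exact ⟨h, h2 y List.mem_cons_self⟩
      · exact hy z hz

theorem pvSorted_foldl_lex (d : Int → Int) : ∀ (xs acc : List Int),
    acc.Pairwise (pvLex d) → (∀ y ∈ acc, ∀ x ∈ xs, y < x) → xs.Pairwise (· < ·) →
    (xs.foldl (fun a x => PySem.List.insertBy (fun a b => decide (d a < d b)) x a) acc).Pairwise (pvLex d) := by
  intro xs
  induction xs with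
  | nil => intro acc h _ _; simpa using h
  | cons x t ih =>
    intro acc hacc hlt hx
    rcases List.pairwise_cons.1 hx with ⟨hxt, ht⟩
    simp only [List.foldl_cons]
    apply ih
    · exact pvInsertBy_lex d x acc hacc (fun y hy => hlt y hy x List.mem_cons_self)
    · intro y hy z hz
      rcases (PySem.List.mem_insertBy _ _ _ _).1 hy with rfl | hy
      · exact hxt z hz
      · exact hlt y hy z (List.mem_cons_of_mem _ hz)
    · exact ht

theorem pvSorted_lex (d : Int → Int) (xs : List Int) (hx : xs.Pairwise (· < ·)) :
    (PySem.List.sorted xs d).Pairwise (pvLex d) := by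
  have : PySem.List.sorted xs d =
      xs.foldl (fun a x => PySem.List.insertBy (fun a b => decide (d a < d b)) x a) [] := by
    simp [PySem.List.sorted]
  rw [this]
  exact pvSorted_foldl_lex d xs [] (by simp) (by simp) hx

theorem pvInnerFold_spec (students bikes : List (Int × Int)) (si : Int) (tk : List Bool) (m' : Nat) :
    pvInvA tk (pvKeyB bikes (PySem.List.pyGetD students si ((0:Int),(0:Int))).1
                          (PySem.List.pyGetD students si ((0:Int),(0:Int))).2) m'
      ((PySem.List.pyRange 0 (m' : Int) 1).foldl (pvInnerStep students bikes si tk) (none, -1)) := by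
  set s := PySem.List.pyGetD students si ((0:Int),(0:Int)) with hs
  set d := pvKeyB bikes s.1 s.2 with hd
  induction m' with
  | zero =>
    left
    constructor
    · simp [PySem.List.pyRange_one_eq_nil]
    · intro j h1 h2; omega
  | succ k ih =>
    have hr : PySem.List.pyRange 0 ((k+1 : Nat) : Int) 1
        = PySem.List.pyRange 0 (k : Int) 1 ++ [(k : Int)] := by
      push_cast
      exact PySem.List.pyRange_one_succ_right (by omega)
    rw [hr, List.foldl_append]
    set r := (PySem.List.pyRange 0 (k : Int) 1).foldl (pvInnerStep students bikes si tk) (none, -1) with hrdef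
    have hdk : pvInnerStep students bikes si tk r (k : Int) =
        if PySem.List.pyGetD tk (k : Int) true = false then
          (match r.1 with
           | none => (some (d (k:Int)), (k:Int))
           | some md =>
             if d (k:Int) < md then (some (d (k:Int)), (k:Int))
             else if d (k:Int) = md then (r.1, if (k:Int) < r.2 then (k:Int) else r.2)
             else r)
        else r := by
      simp only [pvInnerStep, pvKeyB, hd, hs]
    rw [show List.foldl (pvInnerStep students bikes si tk) r [(k:Int)] = pvInnerStep students bikes si tk r (k:Int) from rfl, hdk]
    by_cases hfk : pvFree tk (k : Int)
    · simp only [pvFree] at hfk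
      rw [if_pos hfk]
      rcases ih with ⟨hre, hnone⟩ | ⟨c, hrc, hfc, hc0, hck, hbest⟩
      · rw [hre]
        right
        refine ⟨(k : Int), rfl, hfk, by omega, by omega, ?_⟩
        intro i h0 hik hfi
        have : i = (k : Int) := by
          by_contra hne
          exact hnone i h0 (by omega) hfi
        right; exact ⟨by rw [this], by omega⟩
      · rw [hrc]
        simp only
        by_cases hlt : d (k : Int) < d c
        · rw [if_pos hlt]
          right
          refine ⟨(k : Int), rfl, hfk, by omega, by omega, ?_⟩
          intro i h0 hik hfi
          by_cases hik' : i < (k : Int)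
          · rcases hbest i h0 hik' hfi with h | ⟨h, _⟩
            · left; exact lt_trans hlt h
            · left; exact h ▸ hlt
          · have : i = (k : Int) := by omega
            right; exact ⟨by rw [this], by omega⟩
        · rw [if_neg hlt]
          by_cases heq : d (k : Int) = d c
          · rw [if_pos heq]
            have hnk : ¬ ((k : Int) < c) := by omega
            rw [if_neg hnk]
            right
            refine ⟨c, rfl, hfc, hc0, by omega, ?_⟩
            intro i h0 hik hfi
            by_cases hik' : i < (k : Int)
            · exact hbest i h0 hik' hfi
            · have : i = (k : Int) := by omega
              subst this
              right; exact ⟨heq.symm, by omega⟩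
          · rw [if_neg heq]
            right
            refine ⟨c, rfl, hfc, hc0, by omega, ?_⟩
            intro i h0 hik hfi
            by_cases hik' : i < (k : Int)
            · exact hbest i h0 hik' hfi
            · have : i = (k : Int) := by omega
              subst this
              left; omega
    · simp only [pvFree] at hfk
      rw [if_neg hfk]
      rcases ih with ⟨hre, hnone⟩ | ⟨c, hrc, hfc, hc0, hck, hbest⟩
      · left
        refine ⟨hre, ?_⟩
        intro j h0 hj hfj
        by_cases hjk : j < (k : Int)
        · exact hnone j h0 hjk hfj
        · have : j = (k : Int) := by omega
          exact hfk (this ▸ hfj)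
      · right
        refine ⟨c, hrc, hfc, hc0, by omega, ?_⟩
        intro i h0 hik hfi
        by_cases hik' : i < (k : Int)
        · exact hbest i h0 hik' hfi
        · have : i = (k : Int) := by omega
          exact absurd (this ▸ hfi) hfk

theorem pvStep_eq (students bikes : List (Int × Int)) (si : Int) (tk : List Bool)
    (htk : tk.length = bikes.length) (hb : bikes ≠ []) :
    (((PySem.List.pyRange 0 (bikes.length : Int) 1).foldl (pvInnerStep students bikes si tk) (none, -1)).2
       = (match pvPick (PySem.List.sorted (PySem.List.pyRange 0 (bikes.length : Int) 1)
             (pvKeyB bikes (PySem.List.pyGetD students si ((0:Int),(0:Int))).1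
                          (PySem.List.pyGetD students si ((0:Int),(0:Int))).2)) tk with
          | none => (-1 : Int) | some j => j)) ∧
    PySem.List.pySetD tk
        (((PySem.List.pyRange 0 (bikes.length : Int) 1).foldl (pvInnerStep students bikes si tk) (none, -1)).2) true
      = (match pvPick (PySem.List.sorted (PySem.List.pyRange 0 (bikes.length : Int) 1)
             (pvKeyB bikes (PySem.List.pyGetD students si ((0:Int),(0:Int))).1
                          (PySem.List.pyGetD students si ((0:Int),(0:Int))).2)) tk with
         | none => tk | some j => PySem.List.pySetD tk j true) := by
  set d := pvKeyB bikes (PySem.List.pyGetD students si ((0:Int),(0:Int))).1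
                        (PySem.List.pyGetD students si ((0:Int),(0:Int))).2 with hd
  set order := PySem.List.sorted (PySem.List.pyRange 0 (bikes.length : Int) 1) d with horder
  have hlex : order.Pairwise (pvLex d) :=
    pvSorted_lex d _ (PySem.List.pairwise_lt_pyRange_one 0 (bikes.length : Int))
  have hmem : ∀ j : Int, j ∈ order ↔ (0 ≤ j ∧ j < (bikes.length : Int)) := by
    intro j
    rw [horder, PySem.List.mem_sorted, PySem.List.mem_pyRange_one]
  have hinv := pvInnerFold_spec students bikes si tk bikes.length
  rw [← hd] at hinv
  set r := (PySem.List.pyRange 0 (bikes.length : Int) 1).foldl (pvInnerStep students bikes si tk) (none, -1) with hr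
  cases hpick : pvPick order tk with
  | none =>
    have hnone := pvPick_none order tk hpick
    have hallfree : ∀ j : Int, 0 ≤ j → j < (bikes.length : Int) → ¬ pvFree tk j := by
      intro j h0 hj
      exact hnone j ((hmem j).2 ⟨h0, hj⟩)
    have hre : r = (none, -1) := by
      rcases hinv with ⟨h, _⟩ | ⟨c, _, hfc, hc0, hcm, _⟩
      · exact h
      · exact absurd hfc (hallfree c hc0 hcm)
    refine ⟨by rw [hre], ?_⟩
    rw [hre]
    show PySem.List.pySetD tk (-1) true = tk
    have hlen0 : bikes.length ≠ 0 := fun h0 => hb (List.length_eq_zero_iff.1 h0)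
    apply pvSetD_neg_one_all_true tk (by intro h; apply hlen0; subst h; simpa using htk.symm)
    intro b hbmem
    obtain ⟨idx, hidx, rfl⟩ := List.mem_iff_getElem.1 hbmem
    by_contra hfalse
    have : pvFree tk (idx : Int) := by
      simp only [pvFree, PySem.List.pyGetD_natCast]
      rw [List.getD_eq_getElem _ _ hidx]
      simpa using hfalse
    exact hallfree (idx : Int) (by omega) (by exact_mod_cast htk ▸ hidx) this
  | some c' =>
    obtain ⟨hfc', hc'mem, hbest'⟩ := pvPick_some d order tk c' hlex hpick
    have hc'r := (hmem c').1 hc'mem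
    rcases hinv with ⟨_, hnone⟩ | ⟨c, hrc, hfc, hc0, hcm, hbest⟩
    · exact absurd hfc' (hnone c' hc'r.1 hc'r.2)
    · have h1 := hbest c' hc'r.1 hc'r.2 hfc'
      have h2 := hbest' c ((hmem c).2 ⟨hc0, hcm⟩) hfc
      have : c = c' := by
        rcases h1 with h1 | ⟨e1, l1⟩ <;> rcases h2 with h2 | ⟨e2, l2⟩ <;> omega
      subst this
      rw [hrc]
      exact ⟨rfl, rfl⟩

theorem pvOuter (students bikes : List (Int × Int)) (hb : bikes ≠ []) :
    ∀ (fuel k : Nat) (res : List Int) (tk : List Bool),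
      students.length - k = fuel → k ≤ students.length →
      res.length = students.length → tk.length = bikes.length →
      ((PySem.List.pyRange (k : Int) (students.length : Int) 1).foldl (pvStepA students bikes) (res, tk)).1
        = res.take k ++ pvGoB bikes (students.drop k) tk := by
  intro fuel
  induction fuel with
  | zero =>
    intro k res tk hf hk hres htk
    have hkn : k = students.length := by omega
    subst hkn
    rw [PySem.List.pyRange_one_eq_nil (by omega)]
    simp [pvGoB, List.take_of_length_le (le_of_eq hres)]
  | succ f ih =>
    intro k res tk hf hk hres htk
    have hklt : k < students.length := by omega
    rw [PySem.List.pyRange_one_cons (by exact_mod_cast hklt)]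
    simp only [List.foldl_cons]
    -- unfold one step of A
    have hs : PySem.List.pyGetD students (k : Int) ((0:Int),(0:Int)) = students[k] := by
      rw [PySem.List.pyGetD_natCast, List.getD_eq_getElem _ _ hklt]
    obtain ⟨h1, h2⟩ := pvStep_eq students bikes (k : Int) tk htk hb
    have hdrop : students.drop k = students[k] :: students.drop (k + 1) :=
      List.drop_eq_getElem_cons hklt
    rw [hs] at h1 h2
    set d := pvKeyB bikes (students[k]).1 (students[k]).2 with hd
    set order := PySem.List.sorted (PySem.List.pyRange 0 (bikes.length : Int) 1) d with horder
    have hstep : pvStepA students bikes (res, tk) (k : Int) =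
        (PySem.List.pySetD res (k : Int)
          (match pvPick order tk with | none => (-1 : Int) | some j => j),
         match pvPick order tk with | none => tk | some j => PySem.List.pySetD tk j true) := by
      simp only [pvStepA]
      rw [h2, h1]
    rw [hstep]
    have hset : PySem.List.pySetD res (k : Int)
          (match pvPick order tk with | none => (-1 : Int) | some j => j)
        = res.set k (match pvPick order tk with | none => (-1 : Int) | some j => j) :=
      PySem.List.pySetD_natCast res k _
    rw [hset]
    have hcast : ((k : Int) + 1) = ((k + 1 : Nat) : Int) := by push_cast; ring
    rw [hcast]
    -- goal after: fold from k+1 on (res.set ..., tk')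
    rcases hpick : pvPick order tk with _ | j
    · rw [ih (k+1) _ tk (by omega) (by omega) (by simpa using hres) htk]
      rw [hdrop]
      have : pvGoB bikes (students[k] :: students.drop (k+1)) tk = (-1) :: pvGoB bikes (students.drop (k+1)) tk := by
        show pvGoB bikes ((students[k].1, students[k].2) :: students.drop (k+1)) tk = _
        rw [pvGoB]
        simp only [← hd, ← horder, hpick]
      rw [this]
      -- take (k+1) of set = take k ++ [-1]
      rw [List.set_eq_take_append_cons_drop, if_pos (by omega : k < res.length)]
      rw [List.take_append]
      simp [List.length_take, min_eq_left (le_of_lt (show k < res.length by omega))]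
    · rw [ih (k+1) _ _ (by omega) (by omega) (by simpa using hres) (by simpa using htk)]
      rw [hdrop]
      have : pvGoB bikes (students[k] :: students.drop (k+1)) tk
          = j :: pvGoB bikes (students.drop (k+1)) (PySem.List.pySetD tk j true) := by
        show pvGoB bikes ((students[k].1, students[k].2) :: students.drop (k+1)) tk = _
        rw [pvGoB]
        simp only [← hd, ← horder, hpick]
      rw [this]
      rw [List.set_eq_take_append_cons_drop, if_pos (by omega : k < res.length)]
      rw [List.take_append]
      simp [List.length_take, min_eq_left (le_of_lt (show k < res.length by omega))]

-- ===== VERDICT (by name: the statement is the Claim_ definition above) =====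
theorem find_closest_bikes_spec : Claim_equal_find_closest_bikes := by
  intro students bikes _ hpre
  unfold Spec_find_closest_bikes
  rcases hpre with h | h
  · subst h; rfl
  · show (_ : List Int × List Bool).1 = _
    have := pvOuter students bikes h students.length 0
      (List.replicate (students.length : Int).toNat (-1)) (List.replicate bikes.length false)
      (by omega) (by omega) (by simp) (by simp)
    simpa [find_closest_bikes, find_closest_bikes_alt] using this
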